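-- pv_equiv track=rewrite | github.com/Milena4420/university-exercises | data-structures/Serie 2, SDD-3.py | minEl
-- ===== SOURCE A (Python) =====
-- def minEl(m, s: int):
--     if s == 1:
--         return m[0]
--     minimum = minEl(m,s-1)
--     if m[s-1]<minimum:
--         return m[s-1]
--     else:
--         return minimum
--
--     return None
-- ===== SOURCE B (Python) =====
-- def minEl(m, s: int):
--     minimum = m[0]
--     for i in range(1, s):
--         if m[i] < minimum:
--             minimum = m[i]
--     return minimum
-- ===== Notes on version B (the rewrite author's own statement) =====
-- stated objective: idiomatic
-- what changed: Replaced the recursion over a shrinking prefix with a single iterative forward scan keeping the running minimum.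
import Mathlib
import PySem

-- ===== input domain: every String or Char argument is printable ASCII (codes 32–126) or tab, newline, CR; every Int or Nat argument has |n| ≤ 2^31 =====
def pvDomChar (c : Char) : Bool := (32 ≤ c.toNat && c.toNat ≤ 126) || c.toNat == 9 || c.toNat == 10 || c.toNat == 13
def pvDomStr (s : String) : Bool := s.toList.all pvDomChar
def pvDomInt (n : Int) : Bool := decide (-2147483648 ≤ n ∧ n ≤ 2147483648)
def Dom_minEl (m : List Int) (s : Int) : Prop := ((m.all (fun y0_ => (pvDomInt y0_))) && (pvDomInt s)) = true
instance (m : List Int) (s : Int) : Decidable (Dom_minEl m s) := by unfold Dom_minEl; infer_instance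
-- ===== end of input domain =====

-- B replaces A's recursion over a shrinking prefix by a single iterative forward scan (idiomatic; A's stack becomes O(1) state).

-- ===== PORT A =====
-- Literal port of A's recursion; the `s ≤ 1` guard only makes the recursion total
-- (Python diverges for s ≤ 0, which Pre_ excludes; for s = 1 it is A's base case).
def minEl (m : List Int) (s : Int) : Int :=
  if s ≤ 1 then (PySem.List.pyGet? m 0).getD 0
  else
    let minimum := minEl m (s - 1)
    let last := (PySem.List.pyGet? m (s - 1)).getD 0
    if last < minimum then last else minimum
termination_by s.toNat
decreasing_by omega

-- ===== PORT B =====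
def minEl_alt (m : List Int) (s : Int) : Int :=
  (PySem.List.pyRange 1 s 1).foldl
    (fun minimum i =>
      let x := (PySem.List.pyGet? m i).getD 0
      if x < minimum then x else minimum)
    ((PySem.List.pyGet? m 0).getD 0)

-- ===== PRECONDITION & SPEC =====
-- Pre_ excludes s ≤ 0 (A recurses forever: RecursionError) and s > len(m) (IndexError at m[s-1]).
def Pre_minEl (m : List Int) (s : Int) : Prop := 1 ≤ s ∧ s ≤ m.length
instance (m : List Int) (s : Int) : Decidable (Pre_minEl m s) := by unfold Pre_minEl; infer_instance
def pvWitness_minEl : List Int × Int := ([3, 1, 2], 3)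

def Spec_minEl (m : List Int) (s : Int) (out : Int) : Prop := out = minEl_alt m s
instance (m : List Int) (s : Int) (out : Int) : Decidable (Spec_minEl m s out) := by unfold Spec_minEl; infer_instance

-- ===== CLAIM (what is proved, stated in full; the proofs are below) =====
def Claim_equal_minEl : Prop := ∀ (m : List Int) (s : Int), Dom_minEl m s → Pre_minEl m s → Spec_minEl m s (minEl m s)

-- ===== LEMMAS AND PROOFS =====
theorem minEl_eq_alt (m : List Int) (s : Int) (hs : 1 ≤ s) : minEl m s = minEl_alt m s := by
  induction hn : s.toNat generalizing s with
  | zero => omega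
  | succ n ih =>
    rw [minEl]
    by_cases h1 : s ≤ 1
    · have : s = 1 := le_antisymm h1 hs
      subst this
      simp [minEl_alt, PySem.List.pyRange_one_eq_nil (by omega : (1:Int) ≤ 1)]
    · have h2 : (1:Int) ≤ s - 1 := by omega
      rw [if_neg h1, ih (s - 1) h2 (by omega)]
      have hsplit : PySem.List.pyRange 1 s 1 = PySem.List.pyRange 1 (s-1) 1 ++ [s-1] := by
        have := PySem.List.pyRange_one_succ_right (a := 1) (b := s - 1) (by omega)
        simpa using this
      simp only [minEl_alt, hsplit, List.foldl_append, List.foldl_cons, List.foldl_nil]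

-- ===== VERDICT (by name: the statement is the Claim_ definition above) =====
theorem minEl_spec : Claim_equal_minEl := by
  intro m s _ hpre
  exact minEl_eq_alt m s hpre.1
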